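-- pv_equiv track=rewrite | github.com/FindDefinition/ccimport | ccimport/buildtools/writer.py | _override_flags
-- ===== SOURCE A (Python) =====
-- _ALL_OVERRIDE_FLAGS = (set(["/MT", "/MD", "/LD", "/MTd", "/MDd", "/LDd"]), )
--
-- def _override_flags(major_flags, minor_flags):
--     """if a flag exists in _ALL_OVERRIDE_FLAGS, the one
--     in major flag will override the one in minor.
--     """
--     flag_to_override = set([])
--     for override_flags in _ALL_OVERRIDE_FLAGS:
--         for flag in major_flags:
--             if flag in override_flags:
--                 for flag2 in minor_flags:
--                     if flag2 in override_flags: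
--                         flag_to_override.add(flag2)
--     new_flags = []
--     for flag2 in minor_flags:
--         if flag2 not in flag_to_override:
--             new_flags.append(flag2)
--     return new_flags
-- ===== SOURCE B (Python) =====
-- _ALL_OVERRIDE_FLAGS = (set(["/MT", "/MD", "/LD", "/MTd", "/MDd", "/LDd"]), )
--
-- # Inverted index built once: each override flag -> index of its override group.
-- _GROUP_OF = {flag: idx
--              for idx, ov in enumerate(_ALL_OVERRIDE_FLAGS)
--              for flag in ov}
--
-- def _override_flags(major_flags, minor_flags):
--     """if a flag exists in _ALL_OVERRIDE_FLAGS, the one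
--     in major flag will override the one in minor.
--     """
--     hit = set()
--     for f in major_flags:
--         g = _GROUP_OF.get(f)
--         if g is not None:
--             hit.add(g)
--     return [f for f in minor_flags if _GROUP_OF.get(f) not in hit]
-- ===== Notes on version B (the rewrite author's own statement) =====
-- stated objective: alternative
-- what changed: B replaces A's triple nested loop (for each override set, for each matching major flag, rescan the whole minor list to accumulate an override set) by an inverted flag->group-index dictionary built once from the constant, a single pass over major collecting the set of hit group ids, and a single filtering pass over minor keyed by group id; avoids A's worst-case O(S*M*N) rescans.
import Mathlib
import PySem

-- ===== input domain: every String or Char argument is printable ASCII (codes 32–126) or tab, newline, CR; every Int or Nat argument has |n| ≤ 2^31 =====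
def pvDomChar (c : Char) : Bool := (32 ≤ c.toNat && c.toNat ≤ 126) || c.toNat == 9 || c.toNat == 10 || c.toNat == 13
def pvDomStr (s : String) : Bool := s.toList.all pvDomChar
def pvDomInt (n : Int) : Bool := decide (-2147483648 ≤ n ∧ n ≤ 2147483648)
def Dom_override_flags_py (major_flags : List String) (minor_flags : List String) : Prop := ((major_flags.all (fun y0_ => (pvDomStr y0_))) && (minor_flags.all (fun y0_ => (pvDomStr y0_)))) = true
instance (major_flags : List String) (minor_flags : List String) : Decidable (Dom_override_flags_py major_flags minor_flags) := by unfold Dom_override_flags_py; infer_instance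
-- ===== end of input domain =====

-- B replaces A's nested loops over the override sets by an inverted flag→group-index
-- dictionary built once, a single pass over major collecting hit group ids, and one
-- filtering pass over minor keyed by group id (alternative).

-- _ALL_OVERRIDE_FLAGS: a 1-tuple holding one set (module context used by both ports)
def pvAllOverrideFlags : List (PySem.Set String) :=
  [PySem.Set.ofList ["/MT", "/MD", "/LD", "/MTd", "/MDd", "/LDd"]]

-- ===== PORT A =====
def override_flags_py (major_flags : List String) (minor_flags : List String) : List String :=
  let flag_to_override : PySem.Set String :=
    pvAllOverrideFlags.foldl (fun fto override_flags =>
      major_flags.foldl (fun fto flag =>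
        if PySem.Set.contains override_flags flag then
          minor_flags.foldl (fun fto flag2 =>
            if PySem.Set.contains override_flags flag2 then PySem.Set.add fto flag2 else fto) fto
        else fto) fto) PySem.Set.empty
  minor_flags.foldl (fun new_flags flag2 =>
    if PySem.Set.contains flag_to_override flag2 then new_flags else new_flags ++ [flag2]) []

-- ===== PORT B =====
-- _GROUP_OF: the module-level inverted index {flag: group index} of Source B
def pvGroupOf : PySem.Dict String Int :=
  (PySem.List.enumerate pvAllOverrideFlags 0).foldl (fun d p =>
    p.2.foldl (fun d flag => d.insert flag p.1) d) PySem.Dict.empty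

def override_flags_py_alt (major_flags : List String) (minor_flags : List String) : List String :=
  let hit : PySem.Set Int :=
    major_flags.foldl (fun s f =>
      match pvGroupOf.get? f with          -- g = _GROUP_OF.get(f); if g is not None: hit.add(g)
      | some g => PySem.Set.add s g
      | none => s) PySem.Set.empty
  -- '_GROUP_OF.get(f) not in hit': None is never a member of the int set hit
  minor_flags.filter (fun f =>
    match pvGroupOf.get? f with
    | some g => !PySem.Set.contains hit g
    | none => true)

-- ===== PRECONDITION & SPEC =====
def Spec_override_flags_py (major_flags : List String) (minor_flags : List String) (out : List String) : Prop := out = override_flags_py_alt major_flags minor_flags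
instance (major_flags : List String) (minor_flags : List String) (out : List String) : Decidable (Spec_override_flags_py major_flags minor_flags out) := by unfold Spec_override_flags_py; infer_instance

-- ===== CLAIM (what is proved, stated in full; the proofs are below) =====
def Claim_equal_override_flags_py : Prop := ∀ (major_flags : List String) (minor_flags : List String), Dom_override_flags_py major_flags minor_flags → Spec_override_flags_py major_flags minor_flags (override_flags_py major_flags minor_flags)

-- ===== LEMMAS AND PROOFS =====

-- 'if c: pass else: out.append(x)' loop = filter by the negated test
theorem foldl_skip_if {a : Type} (p : a → Bool) (l acc : List a) :
    l.foldl (fun acc x => if p x then acc else acc ++ [x]) acc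
      = acc ++ l.filter (fun x => !p x) := by
  induction l generalizing acc with
  | nil => simp
  | cons x t ih => cases h : p x <;> simp [ih, h]

-- membership in the set built by A's inner minor-loop
theorem mem_inner_fold (ov : PySem.Set String) (minor : List String) (s : PySem.Set String) (x : String) :
    x ∈ minor.foldl (fun fto flag2 =>
      if PySem.Set.contains ov flag2 then PySem.Set.add fto flag2 else fto) s ↔
    x ∈ s ∨ (x ∈ minor ∧ x ∈ ov) := by
  induction minor generalizing s with
  | nil => simp
  | cons m rest ih =>
    simp only [List.foldl_cons]
    cases h : PySem.Set.contains ov m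
    · have hm : m ∉ ov := by
        intro hmem
        rw [(PySem.Set.contains_iff ov m).mpr hmem] at h
        exact absurd h (by decide)
      rw [ih]
      constructor
      · rintro (hs | ⟨h1, h2⟩)
        · exact Or.inl hs
        · exact Or.inr ⟨List.mem_cons.mpr (Or.inr h1), h2⟩
      · rintro (hs | ⟨h1, h2⟩)
        · exact Or.inl hs
        · rcases List.mem_cons.mp h1 with rfl | h1
          · exact absurd h2 hm
          · exact Or.inr ⟨h1, h2⟩
    · have hm : m ∈ ov := (PySem.Set.contains_iff ov m).mp h
      rw [ih]
      constructor
      · rintro (hs | ⟨h1, h2⟩)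
        · rcases (PySem.Set.mem_add s m x).mp hs with hs | hxm
          · exact Or.inl hs
          · exact Or.inr ⟨List.mem_cons.mpr (Or.inl hxm), hxm ▸ hm⟩
        · exact Or.inr ⟨List.mem_cons.mpr (Or.inr h1), h2⟩
      · rintro (hs | ⟨h1, h2⟩)
        · exact Or.inl ((PySem.Set.mem_add s m x).mpr (Or.inl hs))
        · rcases List.mem_cons.mp h1 with rfl | h1
          · exact Or.inl ((PySem.Set.mem_add s x x).mpr (Or.inr rfl))
          · exact Or.inr ⟨h1, h2⟩

-- membership in the set built by A's major-loop (for one override set ov)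
theorem mem_major_fold (ov : PySem.Set String) (major minor : List String) (s : PySem.Set String) (x : String) :
    x ∈ major.foldl (fun fto flag =>
      if PySem.Set.contains ov flag then
        minor.foldl (fun fto flag2 =>
          if PySem.Set.contains ov flag2 then PySem.Set.add fto flag2 else fto) fto
      else fto) s ↔
    x ∈ s ∨ ((∃ m ∈ major, m ∈ ov) ∧ x ∈ minor ∧ x ∈ ov) := by
  induction major generalizing s with
  | nil => simp
  | cons a rest ih =>
    simp only [List.foldl_cons]
    cases h : PySem.Set.contains ov a
    · have ha : a ∉ ov := by
        intro hmem
        rw [(PySem.Set.contains_iff ov a).mpr hmem] at h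
        exact absurd h (by decide)
      rw [ih]
      constructor
      · rintro (hs | ⟨⟨m, hm, hmo⟩, h2⟩)
        · exact Or.inl hs
        · exact Or.inr ⟨⟨m, List.mem_cons.mpr (Or.inr hm), hmo⟩, h2⟩
      · rintro (hs | ⟨⟨m, hm, hmo⟩, h2⟩)
        · exact Or.inl hs
        · rcases List.mem_cons.mp hm with rfl | hm
          · exact absurd hmo ha
          · exact Or.inr ⟨⟨m, hm, hmo⟩, h2⟩
    · have ha : a ∈ ov := (PySem.Set.contains_iff ov a).mp h
      rw [ih]
      constructor
      · rintro (hs | ⟨⟨m, hm, hmo⟩, h2⟩)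
        · rcases (mem_inner_fold ov minor s x).mp hs with hs | h2
          · exact Or.inl hs
          · exact Or.inr ⟨⟨a, List.mem_cons.mpr (Or.inl rfl), ha⟩, h2⟩
        · exact Or.inr ⟨⟨m, List.mem_cons.mpr (Or.inr hm), hmo⟩, h2⟩
      · rintro (hs | ⟨⟨m, hm, hmo⟩, h2⟩)
        · exact Or.inl ((mem_inner_fold ov minor s x).mpr (Or.inl hs))
        · exact Or.inl ((mem_inner_fold ov minor s x).mpr (Or.inr h2))

-- A's accumulated override set (first phase of port A), named for the proof
def pvFto (major_flags minor_flags : List String) : PySem.Set String :=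
  pvAllOverrideFlags.foldl (fun fto override_flags =>
    major_flags.foldl (fun fto flag =>
      if PySem.Set.contains override_flags flag then
        minor_flags.foldl (fun fto flag2 =>
          if PySem.Set.contains override_flags flag2 then PySem.Set.add fto flag2 else fto) fto
      else fto) fto) PySem.Set.empty

theorem mem_pvFto (major minor : List String) (x : String) :
    x ∈ pvFto major minor ↔
      ((∃ m ∈ major, m ∈ PySem.Set.ofList ["/MT", "/MD", "/LD", "/MTd", "/MDd", "/LDd"]) ∧
        x ∈ minor ∧ x ∈ PySem.Set.ofList ["/MT", "/MD", "/LD", "/MTd", "/MDd", "/LDd"]) := by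
  unfold pvFto pvAllOverrideFlags
  simp only [List.foldl_cons, List.foldl_nil]
  rw [mem_major_fold]
  simp [PySem.Set.empty]

-- the constant inverted index, evaluated
theorem pvGroupOf_eq : pvGroupOf =
    PySem.Dict.mk [("/MT", (0 : Int)), ("/MD", 0), ("/LD", 0), ("/MTd", 0), ("/MDd", 0), ("/LDd", 0)] := by
  decide

-- lookup in the inverted index ↔ membership in the one override set
theorem get_pvGroupOf (f : String) :
    pvGroupOf.get? f =
      if f ∈ PySem.Set.ofList ["/MT", "/MD", "/LD", "/MTd", "/MDd", "/LDd"] then some (0 : Int) else none := by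
  rw [pvGroupOf_eq]
  simp only [PySem.Dict.get?_mk_cons, beq_iff_eq]
  split_ifs <;> first | rfl | simp_all [PySem.Set.mem_ofList, eq_comm]

-- B's hit set contains 0 iff some major flag is in the override set
theorem mem_hit_fold (major : List String) (s : PySem.Set Int) (x : Int) :
    x ∈ major.foldl (fun s f =>
      match pvGroupOf.get? f with
      | some g => PySem.Set.add s g
      | none => s) s ↔
    x ∈ s ∨ ∃ m ∈ major, pvGroupOf.get? m = some x := by
  induction major generalizing s with
  | nil => simp
  | cons a rest ih =>
    simp only [List.foldl_cons]
    cases hg : pvGroupOf.get? a with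
    | none =>
      rw [ih]
      constructor
      · rintro (hs | ⟨m, hm, hmg⟩)
        · exact Or.inl hs
        · exact Or.inr ⟨m, List.mem_cons.mpr (Or.inr hm), hmg⟩
      · rintro (hs | ⟨m, hm, hmg⟩)
        · exact Or.inl hs
        · rcases List.mem_cons.mp hm with rfl | hm
          · rw [hg] at hmg; exact absurd hmg (by simp)
          · exact Or.inr ⟨m, hm, hmg⟩
    | some g =>
      rw [ih]
      constructor
      · rintro (hs | ⟨m, hm, hmg⟩)
        · rcases (PySem.Set.mem_add s g x).mp hs with hs | rfl
          · exact Or.inl hs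
          · exact Or.inr ⟨a, List.mem_cons.mpr (Or.inl rfl), hg⟩
        · exact Or.inr ⟨m, List.mem_cons.mpr (Or.inr hm), hmg⟩
      · rintro (hs | ⟨m, hm, hmg⟩)
        · exact Or.inl ((PySem.Set.mem_add s g x).mpr (Or.inl hs))
        · rcases List.mem_cons.mp hm with rfl | hm
          · rw [hg] at hmg
            exact Or.inl ((PySem.Set.mem_add s g x).mpr (Or.inr (by injection hmg with h; exact h.symm)))
          · exact Or.inr ⟨m, hm, hmg⟩

-- ===== VERDICT (by name: the statement is the Claim_ definition above) =====
theorem override_flags_py_spec : Claim_equal_override_flags_py := by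
  intro major minor _
  show override_flags_py major minor = override_flags_py_alt major minor
  unfold override_flags_py override_flags_py_alt
  rw [show (pvAllOverrideFlags.foldl (fun fto override_flags =>
        major.foldl (fun fto flag =>
          if PySem.Set.contains override_flags flag then
            minor.foldl (fun fto flag2 =>
              if PySem.Set.contains override_flags flag2 then PySem.Set.add fto flag2 else fto) fto
          else fto) fto) PySem.Set.empty) = pvFto major minor from rfl]
  rw [foldl_skip_if (fun flag2 => PySem.Set.contains (pvFto major minor) flag2) minor []]
  rw [List.nil_append]
  apply List.filter_congr
  intro f hf
  set OV := PySem.Set.ofList ["/MT", "/MD", "/LD", "/MTd", "/MDd", "/LDd"] with hOV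
  by_cases hov : f ∈ OV
  · rw [get_pvGroupOf f, if_pos hov]
    by_cases hmaj : ∃ m ∈ major, m ∈ OV
    · have hfto : f ∈ pvFto major minor := (mem_pvFto major minor f).mpr ⟨hmaj, hf, hov⟩
      have hhit : (0 : Int) ∈ major.foldl (fun s f =>
          match pvGroupOf.get? f with
          | some g => PySem.Set.add s g
          | none => s) PySem.Set.empty := by
        rcases hmaj with ⟨m, hm, hmo⟩
        exact (mem_hit_fold major PySem.Set.empty 0).mpr
          (Or.inr ⟨m, hm, by rw [get_pvGroupOf m, if_pos hmo]⟩)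
      simp
      exact iff_of_true hfto hhit
    · have hfto : f ∉ pvFto major minor := fun h =>
        hmaj ((mem_pvFto major minor f).mp h).1
      have hhit : (0 : Int) ∉ major.foldl (fun s f =>
          match pvGroupOf.get? f with
          | some g => PySem.Set.add s g
          | none => s) PySem.Set.empty := by
        intro h
        rcases (mem_hit_fold major PySem.Set.empty 0).mp h with h | ⟨m, hm, hmg⟩
        · exact absurd h (by simp [PySem.Set.empty]) 
        · rw [get_pvGroupOf m] at hmg
          by_cases hmo : m ∈ OV
          · exact hmaj ⟨m, hm, hmo⟩
          · rw [if_neg hmo] at hmg; exact absurd hmg (by simp)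
      simp
      exact iff_of_false hfto hhit
  · rw [get_pvGroupOf f, if_neg hov]
    have hfto : f ∉ pvFto major minor := fun h =>
      hov ((mem_pvFto major minor f).mp h).2.2
    simp
    exact hfto
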